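-- pv_equiv track=rewrite | github.com/Roooommmmelllll/Python-Codes | calculator.py | findOperatorLoc
-- ===== SOURCE A (Python) =====
-- def findOperatorLoc(equation):
--    for i in range (0,len(equation)):
--       if equation[i] == "+":
--          operator = i
--       elif equation[i] == "-":
--          operator = i
--       elif equation[i] == "*":
--          operator = i
--       elif equation[i] == "/":
--          operator = i
--    return operator
-- ===== SOURCE B (Python) =====
-- def findOperatorLoc(equation):
--     # Scan backwards; first operator found from the right is the last one.
--     for i in range(len(equation) - 1, -1, -1):
--         if equation[i] in "+-*/":
--             return i
--     raise ValueError("no operator in equation")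
-- ===== Notes on version B (the rewrite author's own statement) =====
-- stated objective: alternative
-- what changed: B scans the string backwards and returns at the first operator seen (early exit), instead of A's forward pass that overwrites an index variable at every operator.
import Mathlib
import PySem

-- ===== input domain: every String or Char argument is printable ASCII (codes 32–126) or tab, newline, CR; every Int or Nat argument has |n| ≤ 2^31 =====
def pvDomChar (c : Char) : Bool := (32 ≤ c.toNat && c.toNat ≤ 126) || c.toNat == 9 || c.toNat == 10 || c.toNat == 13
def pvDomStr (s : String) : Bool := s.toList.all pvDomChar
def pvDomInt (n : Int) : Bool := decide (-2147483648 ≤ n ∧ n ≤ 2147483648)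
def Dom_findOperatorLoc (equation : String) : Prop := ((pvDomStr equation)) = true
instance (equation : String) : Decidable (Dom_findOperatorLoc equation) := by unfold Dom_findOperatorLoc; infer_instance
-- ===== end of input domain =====

-- B replaces A's forward pass (overwriting a last-seen variable) by a backward scan with early
-- exit; objective: alternative decomposition. Both raise when no operator is present (excluded by Pre_).

-- ===== PORT A =====
-- A's forward loop: `operator` is None until the first assignment (Python: unbound).
def findOperatorLocLoop (l : List Char) (i : Int) (operator : Option Int) : Option Int :=
  match l with
  | [] => operator
  | c :: cs =>
      findOperatorLocLoop cs (i + 1)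
        (if c = '+' then some i
         else if c = '-' then some i
         else if c = '*' then some i
         else if c = '/' then some i
         else operator)

-- final `return operator`: none = UnboundLocalError, excluded by Pre_; .getD 0 is never reached there
def findOperatorLoc (equation : String) : Int :=
  (findOperatorLocLoop equation.toList 0 none).getD 0

-- ===== PORT B =====
def isOpChar (c : Char) : Bool := c = '+' || c = '-' || c = '*' || c = '/'

-- B's backward loop over indices k-1, k-2, …, 0; 0 at exhaustion = B's raise, excluded by Pre_
def findOperatorLocBack (l : List Char) : Nat → Int
  | 0 => 0
  | Nat.succ j => if isOpChar (l.getD j ' ') then (j : Int) else findOperatorLocBack l j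

def findOperatorLoc_alt (equation : String) : Int :=
  findOperatorLocBack equation.toList equation.toList.length

-- ===== PRECONDITION & SPEC =====
-- Pre_ excludes strings with no arithmetic operator, on which A raises UnboundLocalError (B raises ValueError).
def Pre_findOperatorLoc (equation : String) : Prop :=
  (equation.toList.any (fun c => c == '+' || c == '-' || c == '*' || c == '/')) = true
instance (equation : String) : Decidable (Pre_findOperatorLoc equation) := by
  unfold Pre_findOperatorLoc; infer_instance
def pvWitness_findOperatorLoc : String := "a+b"

def Spec_findOperatorLoc (equation : String) (out : Int) : Prop := out = findOperatorLoc_alt equation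
instance (equation : String) (out : Int) : Decidable (Spec_findOperatorLoc equation out) := by unfold Spec_findOperatorLoc; infer_instance

-- ===== CLAIM (what is proved, stated in full; the proofs are below) =====
def Claim_equal_findOperatorLoc : Prop := ∀ (equation : String), Dom_findOperatorLoc equation → Pre_findOperatorLoc equation → Spec_findOperatorLoc equation (findOperatorLoc equation)

-- ===== LEMMAS AND PROOFS =====

-- last operator index of a char list (proof-side characterisation)
def lastOp? : List Char → Option Nat
  | [] => none
  | c :: cs =>
      match lastOp? cs with
      | some j => some (j + 1)
      | none => if isOpChar c then some 0 else none

theorem findOperatorLocLoop_eq (l : List Char) :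
    ∀ (i : Int) (st : Option Int),
      findOperatorLocLoop l i st =
        (match lastOp? l with
         | some j => some (i + (j : Int))
         | none => st) := by
  induction l with
  | nil => intro i st; simp [findOperatorLocLoop, lastOp?]
  | cons c cs ih =>
      intro i st
      simp only [findOperatorLocLoop, ih, lastOp?]
      cases h : lastOp? cs with
      | some j => simp; push_cast; ring_nf
      | none =>
          by_cases h1 : c = '+' <;> by_cases h2 : c = '-' <;>
            by_cases h3 : c = '*' <;> by_cases h4 : c = '/' <;>
            simp [isOpChar, h1, h2, h3, h4]

theorem lastOp?_append (cs : List Char) (c : Char) :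
    lastOp? (cs ++ [c]) =
      (if isOpChar c then some cs.length else lastOp? cs) := by
  induction cs with
  | nil => cases h : isOpChar c <;> simp [lastOp?, h]
  | cons d ds ih =>
      simp only [List.cons_append, lastOp?, ih]
      cases h : isOpChar c <;> cases h2 : lastOp? ds <;> simp [h, h2, lastOp?]

theorem findOperatorLocBack_append (cs : List Char) (c : Char) :
    ∀ k, k ≤ cs.length → findOperatorLocBack (cs ++ [c]) k = findOperatorLocBack cs k := by
  intro k
  induction k with
  | zero => intro _; rfl
  | succ j ih =>
      intro hk
      have hj : j < cs.length := by omega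
      have : (cs ++ [c])[j]? = cs[j]? := List.getElem?_append_left hj
      simp [findOperatorLocBack, this, ih (by omega)]

theorem findOperatorLocBack_eq (l : List Char) :
    findOperatorLocBack l l.length =
      (match lastOp? l with
       | some j => (j : Int)
       | none => 0) := by
  induction l using List.reverseRecOn with
  | nil => simp [findOperatorLocBack, lastOp?]
  | append_singleton cs c ih =>
      have hlen : (cs ++ [c]).length = cs.length + 1 := by simp
      rw [hlen, lastOp?_append]
      have hget : (cs ++ [c]).getD cs.length ' ' = c := by
        simp [List.getD]
      cases h : isOpChar c with
      | true =>
          simp [findOperatorLocBack, hget, h]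
      | false =>
          have hstep : findOperatorLocBack (cs ++ [c]) (cs.length + 1)
              = findOperatorLocBack (cs ++ [c]) cs.length := by
            simp [findOperatorLocBack, hget, h]
          rw [hstep, findOperatorLocBack_append cs c cs.length (le_refl _), ih]
          simp

theorem lastOp?_isSome_of_mem (l : List Char) (c : Char)
    (hc : c ∈ l) (hop : isOpChar c = true) : lastOp? l ≠ none := by
  induction l with
  | nil => simp at hc
  | cons d ds ih =>
      simp only [lastOp?]
      cases h : lastOp? ds with
      | some j => simp
      | none =>
          rcases List.mem_cons.mp hc with rfl | hmem
          · simp [hop]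
          · exact absurd h (ih hmem)

-- ===== VERDICT (by name: the statement is the Claim_ definition above) =====
theorem findOperatorLoc_spec : Claim_equal_findOperatorLoc := by
  intro equation _ hpre
  unfold Spec_findOperatorLoc findOperatorLoc findOperatorLoc_alt
  rw [findOperatorLocLoop_eq, findOperatorLocBack_eq]
  obtain ⟨c, hmem, hc⟩ := List.any_eq_true.mp hpre
  have hop : isOpChar c = true := by
    simp only [isOpChar]; simpa using hc
  have hne := lastOp?_isSome_of_mem equation.toList c hmem hop
  cases h : lastOp? equation.toList with
  | none => exact absurd h hne
  | some j => simp
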